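-- pv_equiv track=rewrite | github.com/pypi-data/pypi-mirror-401 | packages/frequenz-lib-notebooks/frequenz_lib_notebooks-0.14.3-py3-none-any.whl/frequenz/lib/notebooks/solar/maintenance/plotter.py | _find_first_occurrences
-- ===== SOURCE A (Python) =====
-- def _find_first_occurrences(arr: list[str]) -> list[int]:
--     """Find the first occurrences of unique elements in the input list.
--
--     Args:
--         arr: The list of strings to find the first occurrences of.
--
--     Returns:
--         A list containing the indices of the first occurrences of unique
--         elements in the input list.
--     """
--     seen = set()
--     first_occurrences = []
--     for idx, item in enumerate(arr):
--         if item not in seen: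
--             seen.add(item)
--             first_occurrences.append(idx)
--     return first_occurrences
-- ===== SOURCE B (Python) =====
-- def _find_first_occurrences(arr: list[str]) -> list[int]:
--     """Group indices by item, keep the minimum index per distinct string,
--     and return those representative indices in ascending order."""
--     mins: dict[str, int] = {}
--     for idx, item in enumerate(arr):
--         mins[item] = min(mins.get(item, idx), idx)
--     return sorted(mins.values())
-- ===== Notes on version B (the rewrite author's own statement) =====
-- stated objective: alternative
-- what changed: B replaces A's seen-set/append single pass by a grouping strategy: a dict mapping each string to the minimum index seen for it, finished by an ascending sort of the collected representative indices.
import Mathlib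
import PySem

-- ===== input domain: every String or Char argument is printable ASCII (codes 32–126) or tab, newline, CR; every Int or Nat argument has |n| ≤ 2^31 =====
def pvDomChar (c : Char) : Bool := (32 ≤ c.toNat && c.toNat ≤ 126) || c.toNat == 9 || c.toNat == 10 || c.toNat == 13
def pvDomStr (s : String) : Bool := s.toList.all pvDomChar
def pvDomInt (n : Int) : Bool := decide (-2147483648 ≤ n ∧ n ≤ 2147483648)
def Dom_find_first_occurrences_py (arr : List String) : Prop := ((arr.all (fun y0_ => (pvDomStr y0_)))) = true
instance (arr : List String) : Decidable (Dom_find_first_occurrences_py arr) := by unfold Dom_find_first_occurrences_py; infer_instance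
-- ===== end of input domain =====

-- B groups indices into a dict keyed by the string, keeping the minimum index per key, and
-- returns the sorted representative indices; A does a single pass with a seen-set. Same values, total.

-- ===== PORT A =====
-- one loop iteration of A: skip seen items, else record the item and its index
def ffoAStep (st : PySem.Set String × List Int) (p : Int × String) : PySem.Set String × List Int :=
  if PySem.Set.contains st.1 p.2 then st else (PySem.Set.add st.1 p.2, st.2 ++ [p.1])

def find_first_occurrences_py (arr : List String) : List Int :=
  ((PySem.List.enumerate arr 0).foldl ffoAStep (PySem.Set.empty, [])).2

-- ===== PORT B =====
-- one loop iteration of B: mins[item] = min(mins.get(item, idx), idx)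
def ffoBStep (d : PySem.Dict String Int) (p : Int × String) : PySem.Dict String Int :=
  d.insert p.2 (min (d.getD p.2 p.1) p.1)

def find_first_occurrences_py_alt (arr : List String) : List Int :=
  PySem.List.sorted ((PySem.List.enumerate arr 0).foldl ffoBStep PySem.Dict.empty).values
    (fun x => x) false

-- ===== PRECONDITION & SPEC =====
def Spec_find_first_occurrences_py (arr : List String) (out : List Int) : Prop := out = find_first_occurrences_py_alt arr
instance (arr : List String) (out : List Int) : Decidable (Spec_find_first_occurrences_py arr out) := by unfold Spec_find_first_occurrences_py; infer_instance

-- ===== CLAIM (what is proved, stated in full; the proofs are below) =====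
def Claim_equal_find_first_occurrences_py : Prop := ∀ (arr : List String), Dom_find_first_occurrences_py arr → Spec_find_first_occurrences_py arr (find_first_occurrences_py arr)

-- ===== LEMMAS AND PROOFS =====

-- inserting at an existing key the value already stored there is a no-op
theorem ffo_insert_getD_self (d : PySem.Dict String Int) (x : String) (v : Int)
    (hn : d.keys.Nodup) (h : d.get? x = some v) : d.insert x v = d := by
  apply PySem.Dict.ext
  have hc : d.contains x = true := by
    rw [PySem.Dict.contains_eq_isSome_get?, h]; rfl
  rw [PySem.Dict.items_insert_of_contains d v hc]
  have : ∀ p ∈ d.items, (if p.1 == x then (x, v) else p) = p := by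
    intro p hp
    by_cases he : p.1 = x
    · subst he
      have := PySem.Dict.get?_of_mem_items d hp hn
      rw [h] at this
      simp [Option.some.injEq] at this
      simp [this]
    · simp [he]
  rw [List.map_congr_left this]
  simp

-- loop invariant: A's fold started at (d.keys, d.values) tracks B's dict fold,
-- and B's values stay strictly increasing
theorem ffo_loop (ps : List (Int × String)) : ∀ (d : PySem.Dict String Int),
    d.keys.Nodup →
    ps.Pairwise (fun p q => p.1 < q.1) →
    (∀ v ∈ d.values, ∀ q ∈ ps, v < q.1) →
    d.values.Pairwise (· < ·) →
    (ps.foldl ffoAStep (d.keys, d.values)).2 = (ps.foldl ffoBStep d).values ∧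
      (ps.foldl ffoBStep d).values.Pairwise (· < ·) := by
  induction ps with
  | nil => intro d _ _ _ hv; exact ⟨rfl, hv⟩
  | cons p ps ih =>
    intro d hn hp hb hv
    have hps : ps.Pairwise (fun p q => p.1 < q.1) := hp.tail
    have hhd : ∀ q ∈ ps, p.1 < q.1 := by
      intro q hq; exact (List.pairwise_cons.mp hp).1 q hq
    by_cases hc : d.contains p.2 = true
    · -- item already seen: A keeps its state, B's insert is a no-op
      have hsome : (d.get? p.2).isSome = true := by
        rw [← PySem.Dict.contains_eq_isSome_get?]; exact hc
      obtain ⟨v, hv'⟩ := Option.isSome_iff_exists.mp hsome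
      have hvmem : v ∈ d.values := by
        have hm : (p.2, v) ∈ d.items := PySem.Dict.mem_items_of_get?_eq_some d hv'
        simpa [PySem.Dict.values] using List.mem_map_of_mem (f := Prod.snd) hm
      have hvlt : v < p.1 := hb v hvmem p (List.mem_cons_self ..)
      have hgd : d.getD p.2 p.1 = v := PySem.Dict.getD_of_get?_eq_some d p.1 hv'
      have hB : ffoBStep d p = d := by
        rw [ffoBStep, hgd, min_eq_left (le_of_lt hvlt)]
        exact ffo_insert_getD_self d p.2 v hn hv'
      have hA : ffoAStep (d.keys, d.values) p = (d.keys, d.values) := by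
        rw [ffoAStep]
        have hmem : p.2 ∈ d.keys := (PySem.Dict.contains_iff_mem_keys d p.2).mp hc
        simp [hmem]
      rw [List.foldl_cons, List.foldl_cons, hA, hB]
      exact ih d hn hps (fun v hv q hq => hb v hv q (List.mem_cons_of_mem _ hq)) hv
    · -- new item: both sides append
      have hc' : d.contains p.2 = false := by simpa using hc
      have hnk : p.2 ∉ d.keys := fun h =>
        hc ((PySem.Dict.contains_iff_mem_keys d p.2).mpr h)
      have hgd : d.getD p.2 p.1 = p.1 := PySem.Dict.getD_of_not_contains d p.1 hc'
      have hBitems : (ffoBStep d p).items = d.items ++ [(p.2, p.1)] := by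
        rw [ffoBStep, hgd, min_self]
        exact PySem.Dict.items_insert_of_not_contains d p.1 hc'
      have hBkeys : (ffoBStep d p).keys = d.keys ++ [p.2] := by
        simp [PySem.Dict.keys, hBitems]
      have hBvals : (ffoBStep d p).values = d.values ++ [p.1] := by
        simp [PySem.Dict.values, hBitems]
      have hA : ffoAStep (d.keys, d.values) p = (d.keys ++ [p.2], d.values ++ [p.1]) := by
        rw [ffoAStep]
        simp [hnk]
      have hn' : (ffoBStep d p).keys.Nodup := by
        rw [hBkeys, List.nodup_append]
        refine ⟨hn, List.nodup_singleton _, ?_⟩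
        intro a ha b hb h
        subst h
        simp only [List.mem_singleton] at hb
        exact hnk (hb ▸ ha)
      have hb' : ∀ v ∈ (ffoBStep d p).values, ∀ q ∈ ps, v < q.1 := by
        intro v hv' q hq
        rw [hBvals] at hv'
        rcases List.mem_append.mp hv' with h | h
        · exact hb v h q (List.mem_cons_of_mem _ hq)
        · simp at h; subst h; exact hhd q hq
      have hv' : (ffoBStep d p).values.Pairwise (· < ·) := by
        rw [hBvals]
        refine List.pairwise_append.mpr ⟨hv, List.pairwise_singleton .., ?_⟩
        intro a ha b hb'
        simp at hb'; subst hb'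
        exact hb a ha p (List.mem_cons_self ..)
      rw [List.foldl_cons, List.foldl_cons, hA, ← hBkeys, ← hBvals]
      exact ih (ffoBStep d p) hn' hps hb' hv'

-- ===== VERDICT (by name: the statement is the Claim_ definition above) =====
theorem find_first_occurrences_py_spec : Claim_equal_find_first_occurrences_py := by
  unfold Claim_equal_find_first_occurrences_py
  intro arr _
  unfold Spec_find_first_occurrences_py find_first_occurrences_py find_first_occurrences_py_alt
  have h := ffo_loop (PySem.List.enumerate arr 0) PySem.Dict.empty
    (by simp [PySem.Dict.keys, PySem.Dict.empty])
    (PySem.List.pairwise_lt_enumerate arr 0)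
    (by simp [PySem.Dict.values, PySem.Dict.empty])
    (by simp [PySem.Dict.values, PySem.Dict.empty])
  have hk : (PySem.Dict.empty : PySem.Dict String Int).keys = PySem.Set.empty := rfl
  have hv : (PySem.Dict.empty : PySem.Dict String Int).values = ([] : List Int) := rfl
  rw [hk, hv] at h
  rw [h.1, PySem.List.sorted_eq_self_of_pairwise _ _ (h.2.imp le_of_lt)]
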